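-- pv_equiv track=rewrite | github.com/jctian98/e2e_lfmmi | nets/scorers/trace_frame.py | split_forward_scores
-- ===== SOURCE A (Python) =====
-- def split_forward_scores(scores):
--     # splits the forward_scores according to the start state
--     scores_splits = []
--     prev_idx = 0
--     for i in range(1, len(scores)):
--         if scores[i] == 0:
--             scores_splits.append(scores[prev_idx: i])
--             prev_idx = i
--     scores_splits.append(scores[prev_idx:])
--     return scores_splits
-- ===== SOURCE B (Python) =====
-- def split_forward_scores(scores):
--     # build the groups back-to-front, element by element (no index slicing):
--     # scanning right-to-left, each element joins the currently open group; a zero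
--     # (which is a group's start) closes it.  The very first element never splits.
--     if not scores:
--         return [[]]
--     groups = [[]]           # groups in reverse order, each group reversed
--     for x in reversed(scores[1:]):
--         groups[-1].append(x)
--         if x == 0:
--             groups.append([])
--     groups[-1].append(scores[0])
--     return [g[::-1] for g in reversed(groups)]
-- ===== Notes on version B (the rewrite author's own statement) =====
-- stated objective: alternative
-- what changed: B never slices or tracks indices: it builds the groups back-to-front, scanning the elements right-to-left and appending each element to the currently open group (a zero closes the group it starts), then reverses everything at the end, whereas A walks indices forward and cuts the list with scores[prev_idx:i] slices.
import Mathlib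
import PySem

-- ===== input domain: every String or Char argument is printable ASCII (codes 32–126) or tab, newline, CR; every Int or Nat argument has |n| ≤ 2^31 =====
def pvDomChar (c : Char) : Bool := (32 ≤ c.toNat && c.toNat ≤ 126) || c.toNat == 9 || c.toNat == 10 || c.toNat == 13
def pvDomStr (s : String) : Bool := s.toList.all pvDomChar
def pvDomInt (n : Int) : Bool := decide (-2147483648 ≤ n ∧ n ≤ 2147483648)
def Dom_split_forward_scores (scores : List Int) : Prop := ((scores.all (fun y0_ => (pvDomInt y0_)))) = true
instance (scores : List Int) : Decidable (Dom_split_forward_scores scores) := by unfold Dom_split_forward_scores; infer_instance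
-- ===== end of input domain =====

-- B builds the groups back-to-front, element by element (no index arithmetic, no
-- slicing), instead of A's forward index loop cutting scores[prev_idx:i] slices
-- (objective: alternative).

-- ===== PORT A =====
def split_forward_scores (scores : List Int) : List (List Int) :=
  -- scores_splits = []; prev_idx = 0; for i in range(1, len(scores)): ...
  let st := (PySem.List.pyRange 1 (scores.length : Int) 1).foldl
    (fun (st : List (List Int) × Int) i =>
      if PySem.List.pyGet? scores i == some 0 then
        (st.1 ++ [PySem.List.slice scores (some st.2) (some i)], i)
      else st)
    ([], 0)
  -- scores_splits.append(scores[prev_idx:])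
  st.1 ++ [PySem.List.slice scores (some st.2) none]

-- ===== PORT B =====
-- groups[-1].append(x): append x to the last group
def pvAppendLast (gs : List (List Int)) (x : Int) : List (List Int) :=
  match gs with
  | [] => []
  | [g] => [g ++ [x]]
  | g :: g' :: t => g :: pvAppendLast (g' :: t) x

def split_forward_scores_alt (scores : List Int) : List (List Int) :=
  match scores with
  | [] => [[]]                          -- if not scores: return [[]]
  | h :: t =>
    -- for x in reversed(scores[1:]): groups[-1].append(x); if x == 0: groups.append([])
    let groups := t.reverse.foldl
      (fun gs x =>
        let gs := pvAppendLast gs x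
        if x == 0 then gs ++ [[]] else gs)
      [[]]
    -- groups[-1].append(scores[0])
    let groups := pvAppendLast groups h
    -- return [g[::-1] for g in reversed(groups)]   (g[::-1] = reverse, PySem.List.slice?_none_none_neg_one)
    groups.reverse.map List.reverse

-- ===== PRECONDITION & SPEC =====
def Spec_split_forward_scores (scores : List Int) (out : List (List Int)) : Prop := out = split_forward_scores_alt scores
instance (scores : List Int) (out : List (List Int)) : Decidable (Spec_split_forward_scores scores out) := by unfold Spec_split_forward_scores; infer_instance

-- ===== CLAIM (what is proved, stated in full; the proofs are below) =====
def Claim_equal_split_forward_scores : Prop := ∀ (scores : List Int), Dom_split_forward_scores scores → Spec_split_forward_scores scores (split_forward_scores scores)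

-- ===== LEMMAS AND PROOFS =====

/-- Prepend `x` to the first group (creating it if absent). -/
def pvConsFirst (x : Int) : List (List Int) → List (List Int)
  | [] => [[x]]
  | g :: gs => (x :: g) :: gs

/-- The common recursive specification both programs are reduced to:
split at EVERY zero (the exemption of position 0 is handled by the callers). -/
def pvGo : List Int → List (List Int)
  | [] => [[]]
  | x :: xs => if x = 0 then [] :: pvConsFirst x (pvGo xs) else pvConsFirst x (pvGo xs)

/-- Reverse the group order and each group. -/
def pvMirror (gs : List (List Int)) : List (List Int) := (gs.map List.reverse).reverse

/-- The body of B's loop, named for the proofs (definitionally B's lambda). -/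
def pvStepR (x : Int) (gs : List (List Int)) : List (List Int) :=
  if x == 0 then pvAppendLast gs x ++ [[]] else pvAppendLast gs x

-- ---------- A-side: the foldl is a chain of slices at the zero positions ----------

/-- Slices of `scores` between consecutive elements of `prev :: ks`. -/
def pvChain (scores : List Int) : Int → List Int → List (List Int)
  | _, [] => []
  | prev, k :: ks => PySem.List.slice scores (some prev) (some k) :: pvChain scores k ks

theorem pvFoldl_eq_chain (scores : List Int) (L : List Int) (acc : List (List Int)) (prev : Int) :
    L.foldl
      (fun (st : List (List Int) × Int) i =>
        if PySem.List.pyGet? scores i == some 0 then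
          (st.1 ++ [PySem.List.slice scores (some st.2) (some i)], i)
        else st)
      (acc, prev)
    = (acc ++ pvChain scores prev
        (L.filter (fun i => PySem.List.pyGet? scores i == some 0)),
       (L.filter (fun i => PySem.List.pyGet? scores i == some 0)).foldl (fun _ k => k) prev) := by
  induction L generalizing acc prev with
  | nil => simp [pvChain]
  | cons a L ih =>
    rw [List.foldl_cons, List.filter_cons]
    by_cases h : (PySem.List.pyGet? scores a == some 0) = true
    · rw [if_pos h, ih]
      simp [h, pvChain]
    · rw [if_neg h, ih]
      simp [h]

theorem pvLastD_mem (ks : List Int) (prev : Int) :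
    ks.foldl (fun _ k => k) prev ∈ prev :: ks := by
  induction ks generalizing prev with
  | nil => simp
  | cons k ks ih =>
    have := ih k
    simp only [List.foldl_cons]
    rcases List.mem_cons.mp this with h | h
    · simp [h]
    · simp [h]

-- ---------- index-shift lemmas ----------

theorem pvGet_shift (x : Int) (xs : List Int) (z : Int) (hz : 0 ≤ z) :
    PySem.List.pyGet? (x :: xs) (z + 1) = PySem.List.pyGet? xs z := by
  have h1 : z = (z.toNat : Int) := (Int.toNat_of_nonneg hz).symm
  rw [h1, PySem.List.pyGet?_cons_succ, ← h1]

theorem pvSlice_shift (x : Int) (t : List Int) (a b : Int) (ha : 0 ≤ a) (hb : 0 ≤ b) :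
    PySem.List.slice (x :: t) (some (a + 1)) (some (b + 1)) = PySem.List.slice t (some a) (some b) := by
  rw [PySem.List.slice_toNat _ (by omega) (by omega), PySem.List.slice_toNat _ ha hb]
  have ha' : (a + 1).toNat = a.toNat + 1 := by omega
  have hb' : (b + 1).toNat = b.toNat + 1 := by omega
  rw [ha', hb']
  simp

theorem pvSliceFrom_shift (x : Int) (t : List Int) (a : Int) (ha : 0 ≤ a) :
    PySem.List.slice (x :: t) (some (a + 1)) none = PySem.List.slice t (some a) none := by
  rw [PySem.List.slice_from _ (by omega), PySem.List.slice_from _ ha]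
  have : (a + 1).toNat = a.toNat + 1 := by omega
  rw [this]
  simp

theorem pvSliceHead (x : Int) (t : List Int) (b : Int) (hb : 0 ≤ b) :
    PySem.List.slice (x :: t) (some 0) (some (b + 1)) = x :: PySem.List.slice t (some 0) (some b) := by
  simp only [PySem.List.slice_zero_start]
  rw [PySem.List.slice_to _ (by omega), PySem.List.slice_to _ hb]
  have : (b + 1).toNat = b.toNat + 1 := by omega
  rw [this]
  simp

theorem pvChain_shift (x : Int) (t : List Int) (zs : List Int) (p : Int) (hp : 0 ≤ p)
    (hzs : ∀ z ∈ zs, 0 ≤ z) :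
    pvChain (x :: t) (p + 1) (zs.map (· + 1)) = pvChain t p zs := by
  induction zs generalizing p with
  | nil => simp [pvChain]
  | cons z zs ih =>
    have hz : 0 ≤ z := hzs z (by simp)
    simp only [List.map_cons, pvChain]
    rw [pvSlice_shift x t p z hp hz, ih z hz (fun w hw => hzs w (by simp [hw]))]

theorem pvLast_shift (zs : List Int) (p : Int) :
    (zs.map (· + 1)).foldl (fun _ k => k) (p + 1) = zs.foldl (fun _ k => k) p + 1 := by
  induction zs generalizing p with
  | nil => simp
  | cons z zs ih => simp [ih]

/-- SHIFT: the whole chain form on `x :: t` (boundaries shifted by one) is the chain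
form on `t` with `x` prepended to the first group. -/
theorem pvShift (x : Int) (t : List Int) (zs : List Int) (hzs : ∀ z ∈ zs, 0 ≤ z) :
    pvChain (x :: t) 0 (zs.map (· + 1))
      ++ [PySem.List.slice (x :: t) (some ((zs.map (· + 1)).foldl (fun _ k => k) 0)) none]
    = pvConsFirst x (pvChain t 0 zs
      ++ [PySem.List.slice t (some (zs.foldl (fun _ k => k) 0)) none]) := by
  cases zs with
  | nil =>
    simp [pvChain, pvConsFirst, PySem.List.slice_none_none]
  | cons z zs =>
    have hz : 0 ≤ z := hzs z (by simp)
    have hzs' : ∀ w ∈ zs, 0 ≤ w := fun w hw => hzs w (by simp [hw])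
    have hlast : 0 ≤ zs.foldl (fun _ k => k) z := by
      rcases List.mem_cons.mp (pvLastD_mem zs z) with h | h
      · omega
      · exact hzs' _ h
    simp only [List.map_cons, pvChain, List.foldl_cons]
    rw [pvSliceHead x t z hz, pvChain_shift x t zs z hz hzs', pvLast_shift,
        pvSliceFrom_shift x t _ hlast]
    simp [pvConsFirst]

-- ---------- zero positions ----------

/-- All 0-based zero positions of `t`. -/
def pvZAll (t : List Int) : List Int :=
  (PySem.List.pyRange 0 (t.length : Int) 1).filter
    (fun i => PySem.List.pyGet? t i == some 0)

theorem pvZAll_nonneg (t : List Int) : ∀ z ∈ pvZAll t, 0 ≤ z := by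
  intro z hz
  have := PySem.List.mem_pyRange_one.mp (List.mem_of_mem_filter hz)
  omega

theorem pvRange_succ_shift (n : Nat) :
    PySem.List.pyRange 1 ((n : Int) + 1) 1 = (PySem.List.pyRange 0 (n : Int) 1).map (· + 1) := by
  rw [PySem.List.pyRange_one, PySem.List.pyRange_one]
  simp only [Int.sub_zero, Int.add_sub_cancel, List.map_map]
  exact List.map_congr_left (fun k _ => by simp [Function.comp]; ring)

/-- The zero positions of `x :: t` at index ≥ 1 are the zero positions of `t`,
shifted by one. -/
theorem pvKs_eq (x : Int) (t : List Int) :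
    (PySem.List.pyRange 1 (((x :: t).length : Int)) 1).filter
        (fun i => PySem.List.pyGet? (x :: t) i == some 0)
    = (pvZAll t).map (· + 1) := by
  have hlen : (((x :: t).length : Int)) = (t.length : Int) + 1 := by
    simp
  rw [hlen, pvRange_succ_shift, List.filter_map]
  unfold pvZAll
  congr 1
  apply List.filter_congr
  intro z hz
  have hz0 : 0 ≤ z := (PySem.List.mem_pyRange_one.mp hz).1
  simp [Function.comp, pvGet_shift x t z hz0]

-- ---------- B-side: reduce the foldl to pvGo ----------

theorem pvAppendLast_ne_nil (gs : List (List Int)) (x : Int) (h : gs ≠ []) :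
    pvAppendLast gs x ≠ [] := by
  cases gs with
  | nil => exact absurd rfl h
  | cons g gs => cases gs <;> simp [pvAppendLast]

theorem pvMirror_ne_nil (gs : List (List Int)) (h : gs ≠ []) : pvMirror gs ≠ [] := by
  unfold pvMirror
  simp [h]

theorem pvConsFirst_append_singleton (x : Int) (A : List (List Int)) (b : List Int) (hA : A ≠ []) :
    pvConsFirst x (A ++ [b]) = pvConsFirst x A ++ [b] := by
  cases A with
  | nil => exact absurd rfl hA
  | cons g gs => simp [pvConsFirst]

theorem pvMirror_appendLast (gs : List (List Int)) (x : Int) (h : gs ≠ []) :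
    pvMirror (pvAppendLast gs x) = pvConsFirst x (pvMirror gs) := by
  induction gs with
  | nil => exact absurd rfl h
  | cons g gs ih =>
    cases gs with
    | nil => simp [pvAppendLast, pvMirror, pvConsFirst]
    | cons g' t =>
      have hne : (g' :: t : List (List Int)) ≠ [] := by simp
      have hm := ih hne
      have h1 : pvMirror (g' :: t) ≠ [] := pvMirror_ne_nil _ hne
      have e1 : pvMirror (g :: g' :: t) = pvMirror (g' :: t) ++ [g.reverse] := by
        simp [pvMirror]
      have e2 : pvMirror (pvAppendLast (g :: g' :: t) x)
          = pvMirror (pvAppendLast (g' :: t) x) ++ [g.reverse] := by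
        simp [pvAppendLast, pvMirror]
      rw [e2, e1, hm, pvConsFirst_append_singleton _ _ _ h1]

theorem pvFoldrState_ne_nil (t : List Int) :
    t.foldr pvStepR [[]] ≠ [] := by
  induction t with
  | nil => simp
  | cons x xs ih =>
    rw [List.foldr_cons]
    unfold pvStepR
    by_cases h : (x == 0) = true
    · rw [if_pos h]; simp
    · rw [if_neg h]; exact pvAppendLast_ne_nil _ _ ih

theorem pvMirror_foldr (t : List Int) :
    pvMirror (t.foldr pvStepR [[]]) = pvGo t := by
  induction t with
  | nil => simp [pvMirror, pvGo]
  | cons x xs ih =>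
    rw [List.foldr_cons]
    set S := xs.foldr pvStepR [[]] with hS
    have hSne : S ≠ [] := pvFoldrState_ne_nil xs
    unfold pvStepR
    by_cases h : (x == 0) = true
    · have hx : x = 0 := by simpa using h
      rw [if_pos h]
      have e : pvMirror (pvAppendLast S x ++ [[]])
          = [] :: pvMirror (pvAppendLast S x) := by
        simp [pvMirror]
      rw [e, pvMirror_appendLast _ _ hSne, ih]
      simp [pvGo, hx]
    · have hx : ¬ x = 0 := by simpa using h
      rw [if_neg h, pvMirror_appendLast _ _ hSne, ih]
      simp [pvGo, hx]

-- ---------- pvGo equals the chain form ----------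

theorem pvZAll_cons (x : Int) (xs : List Int) :
    pvZAll (x :: xs)
    = (if x = 0 then [0] else []) ++ (pvZAll xs).map (· + 1) := by
  have h0 : ((0 : Int) < ((x :: xs).length : Int)) := by
    simp
  unfold pvZAll
  rw [PySem.List.pyRange_one_cons h0, List.filter_cons]
  have hk := pvKs_eq x xs
  unfold pvZAll at hk
  have hlen : (((x :: xs).length : Int)) = (xs.length : Int) + 1 := by simp
  have h01 : ((0 : Int) + 1) = 1 := by norm_num
  rw [h01, hlen, ← hlen, hk]
  by_cases hx : x = 0
  · simp [hx]
  · simp [hx]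

theorem pvGo_eq_chain (t : List Int) :
    pvGo t = pvChain t 0 (pvZAll t)
      ++ [PySem.List.slice t (some ((pvZAll t).foldl (fun _ k => k) 0)) none] := by
  induction t with
  | nil =>
    simp [pvGo, pvZAll, pvChain, PySem.List.pyRange_one_eq_nil, PySem.List.slice_none_none]
  | cons x xs ih =>
    rw [pvZAll_cons]
    by_cases hx : x = 0
    · rw [if_pos hx]
      simp only [List.cons_append, List.nil_append, pvChain, List.foldl_cons]
      have hsz : PySem.List.slice (x :: xs) (some 0) (some 0) = [] := by
        simp [PySem.List.slice_to]
      rw [hsz, pvShift x xs (pvZAll xs) (pvZAll_nonneg xs), ← ih]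
      simp [pvGo, hx]
    · rw [if_neg hx]
      simp only [List.nil_append]
      rw [pvShift x xs (pvZAll xs) (pvZAll_nonneg xs), ← ih]
      simp [pvGo, hx]

-- ===== VERDICT (by name: the statement is the Claim_ definition above) =====
theorem split_forward_scores_spec : Claim_equal_split_forward_scores := by
  intro scores _
  unfold Spec_split_forward_scores
  cases scores with
  | nil => decide
  | cons h t =>
    -- A side reduces to pvConsFirst h (pvGo t)
    have hA : split_forward_scores (h :: t) = pvConsFirst h (pvGo t) := by
      unfold split_forward_scores
      rw [pvFoldl_eq_chain]
      simp only [List.nil_append]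
      rw [pvKs_eq h t, pvShift h t (pvZAll t) (pvZAll_nonneg t), ← pvGo_eq_chain]
    -- B side reduces to pvConsFirst h (pvGo t)
    have hB : split_forward_scores_alt (h :: t) = pvConsFirst h (pvGo t) := by
      show (pvAppendLast (t.reverse.foldl
              (fun gs x => if x == 0 then pvAppendLast gs x ++ [[]] else pvAppendLast gs x)
              [[]]) h).reverse.map List.reverse
          = pvConsFirst h (pvGo t)
      rw [List.foldl_reverse]
      have hfr : t.foldr (fun x gs => if x == 0 then pvAppendLast gs x ++ [[]] else pvAppendLast gs x) [[]]
          = t.foldr pvStepR [[]] := rfl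
      rw [hfr]
      have hmr : ∀ gs : List (List Int), gs.reverse.map List.reverse = pvMirror gs := by
        intro gs
        simp [pvMirror, List.map_reverse]
      rw [hmr, pvMirror_appendLast _ _ (pvFoldrState_ne_nil t), pvMirror_foldr]
    rw [hA, hB]
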